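-- pv_equiv track=rewrite | github.com/ketkat001/Programmers-coding | Level_3/징검다리.py | solution
-- ===== SOURCE A (Python) =====
-- def possible(stones, k, mid):
--     cnt = 0
--     for i in range(len(stones)):
--         if stones[i] < mid:
--             cnt += 1
--         else:
--             cnt = 0
--         if cnt == k:
--             return False
--     return True
--
-- def solution(stones, k):
--     left, right = 1, max(stones) + 1
--     while left < right - 1:
--         mid = (left+right) // 2
--         if possible(stones, k, mid):
--             left = mid
--         else:
--             right = mid
--     return left
-- ===== SOURCE B (Python) =====
-- def solution(stones, k):
--     # Block decomposition: the max of every k-window is max(suffix-in-block, prefix-in-block);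
--     # the answer is the smallest such window max, floored at the search range's lower end 1.
--     n = len(stones)
--     hi = max(stones)
--     if not (1 <= k <= n):
--         # no window of k consecutive stones exists, so nothing caps the answer below the ceiling
--         return max(1, hi)
--     pre = []
--     for i in range(n):
--         pre.append(stones[i] if i % k == 0 else max(pre[-1], stones[i]))
--     suf = [0] * n
--     for i in range(n - 1, -1, -1):
--         suf[i] = stones[i] if (i % k == k - 1 or i == n - 1) else max(suf[i + 1], stones[i])
--     best = min(max(s, p) for s, p in zip(suf, pre[k - 1:]))
--     return max(1, best)
-- ===== Notes on version B (the rewrite author's own statement) =====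
-- stated objective: alternative
-- what changed: Replaces the feasibility binary search over candidate values with a direct block-decomposition sliding-window computation: the answer is the minimum over all k-windows of the window maximum (floored at 1), computed from per-block prefix/suffix maxima in a constant number of passes.
-- outside the precondition, e.g. on solution([2, 2], 0): A returns 1, B returns 2
import Mathlib
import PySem

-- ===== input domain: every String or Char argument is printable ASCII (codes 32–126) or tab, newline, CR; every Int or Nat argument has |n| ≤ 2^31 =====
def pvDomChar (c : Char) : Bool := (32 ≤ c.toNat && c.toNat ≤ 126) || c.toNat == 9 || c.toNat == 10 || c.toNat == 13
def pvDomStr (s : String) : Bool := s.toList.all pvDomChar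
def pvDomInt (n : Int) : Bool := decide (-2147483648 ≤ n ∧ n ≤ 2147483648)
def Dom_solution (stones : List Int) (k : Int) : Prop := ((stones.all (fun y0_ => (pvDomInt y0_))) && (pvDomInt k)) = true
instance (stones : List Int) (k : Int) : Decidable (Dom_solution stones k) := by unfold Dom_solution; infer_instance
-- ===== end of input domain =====

-- B replaces A's feasibility binary search by a direct block-decomposition sliding-window
-- minimum of window maxima (objective: alternative algorithm; not measured faster).

-- ===== PORT A =====
-- possible(stones, k, mid): scan counting the current run of stones < mid; False when it reaches k
def possibleGo (k mid : Int) : List Int → Int → Bool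
  | [], _ => true
  | s :: rest, cnt =>
    let c := if s < mid then cnt + 1 else 0
    if c == k then false else possibleGo k mid rest c

def possible (stones : List Int) (k mid : Int) : Bool := possibleGo k mid stones 0

-- while left < right - 1: mid = (left+right)//2; …
def bsLoop (stones : List Int) (k left right : Int) : Int :=
  if h : left < right - 1 then
    let mid := PySem.Int.floordiv (left + right) 2
    if possible stones k mid then bsLoop stones k mid right
    else bsLoop stones k left mid
  else left
termination_by (right - left).toNat
decreasing_by
  · have h1 : left + 1 ≤ PySem.Int.floordiv (left + right) 2 :=
      (PySem.Int.le_floordiv_iff_mul_le (by omega)).2 (by omega)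
    omega
  · have h2 : PySem.Int.floordiv (left + right) 2 < right :=
      (PySem.Int.floordiv_lt_iff_lt_mul (by omega)).2 (by omega)
    have h1 : left + 1 ≤ PySem.Int.floordiv (left + right) 2 :=
      (PySem.Int.le_floordiv_iff_mul_le (by omega)).2 (by omega)
    omega

def solution (stones : List Int) (k : Int) : Int :=
  -- max(stones) raises ValueError on []: excluded by Pre_solution
  let right := (PySem.List.max? stones (fun y => y)).getD 0 + 1
  bsLoop stones k 1 right

-- ===== PORT B =====
-- pre.append(stones[i] if i % k == 0 else max(pre[-1], stones[i]))  (prev carries pre[-1])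
def preGo (k : Int) : List Int → Nat → Int → List Int
  | [], _, _ => []
  | x :: rest, i, prev =>
    let cur := if PySem.Int.mod (i : Int) k == 0 then x else max prev x
    cur :: preGo k rest (i + 1) cur

-- suf[i] = stones[i] if (i % k == k - 1 or i == n - 1) else max(suf[i+1], stones[i])
def sufGo (k : Int) (n : Nat) : List Int → Nat → List Int
  | [], _ => []
  | x :: rest, i =>
    let s := sufGo k n rest (i + 1)
    (if PySem.Int.mod (i : Int) k == k - 1 || i == n - 1 then x else max (s.headD 0) x) :: s

def solution_alt (stones : List Int) (k : Int) : Int :=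
  let n := stones.length
  let hi := (PySem.List.max? stones (fun y => y)).getD 0   -- max(stones): raises on [], outside Pre_
  if 1 ≤ k ∧ k ≤ (n : Int) then
    let pre := preGo k stones 0 0
    let suf := sufGo k n stones 0
    -- pre[k-1:] with k-1 ≥ 0 is exactly drop; min(…) of the nonempty zip
    let best := (PySem.List.min?
        ((suf.zip (pre.drop (k - 1).toNat)).map (fun p => max p.1 p.2)) (fun y => y)).getD 0
    max 1 best
  else max 1 hi

-- ===== PRECONDITION & SPEC =====
-- Pre_ excludes [] (max(stones) raises ValueError) and the degenerate k = 0, a count no caller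
-- means, on which A's scan rejects every candidate and returns its search floor 1 while B treats
-- k = 0 like any other k admitting no window; both values are scaffolding artefacts.
def Pre_solution (stones : List Int) (k : Int) : Prop := stones ≠ [] ∧ k ≠ 0
instance (stones : List Int) (k : Int) : Decidable (Pre_solution stones k) := by unfold Pre_solution; infer_instance
def pvWitness_solution : List Int × Int := ([2, 5, 1], 2)

def Spec_solution (stones : List Int) (k : Int) (out : Int) : Prop := out = solution_alt stones k
instance (stones : List Int) (k : Int) (out : Int) : Decidable (Spec_solution stones k out) := by unfold Spec_solution; infer_instance

-- ===== CLAIM (what is proved, stated in full; the proofs are below) =====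
def Claim_equal_solution : Prop := ∀ (stones : List Int) (k : Int), Dom_solution stones k → Pre_solution stones k → Spec_solution stones k (solution stones k)

-- ===== LEMMAS AND PROOFS =====

-- max of the nonempty list x :: l, and min
def wmax (x : Int) (l : List Int) : Int := l.foldl max x
def wmin (x : Int) (l : List Int) : Int := l.foldl min x

theorem le_foldl_max_iff (l : List Int) (x a : Int) :
    a ≤ l.foldl max x ↔ a ≤ x ∨ ∃ y ∈ l, a ≤ y := by
  induction l generalizing x with
  | nil => simp
  | cons z t ih =>
    simp only [List.foldl, ih, le_max_iff, List.mem_cons]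
    constructor
    · rintro (⟨h | h⟩ | ⟨y, hy, h⟩)
      · exact Or.inl h
      · exact Or.inr ⟨z, Or.inl rfl, h⟩
      · exact Or.inr ⟨y, Or.inr hy, h⟩
    · rintro (h | ⟨y, hy | hy, h⟩)
      · exact Or.inl (Or.inl h)
      · exact Or.inl (Or.inr (hy ▸ h))
      · exact Or.inr ⟨y, hy, h⟩

theorem foldl_max_mem (l : List Int) (x : Int) : l.foldl max x = x ∨ l.foldl max x ∈ l := by
  induction l generalizing x with
  | nil => simp
  | cons z t ih =>
    simp only [List.foldl_cons]
    rcases ih (max x z) with h | h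
    · rcases max_cases x z with ⟨he, _⟩ | ⟨he, _⟩
      · exact Or.inl (h.trans he)
      · exact Or.inr (by rw [h, he]; exact List.mem_cons_self)
    · exact Or.inr (List.mem_cons_of_mem _ h)

-- cnts: the scan of run counters the possible() loop walks through
def cnts (mid c : Int) : List Int → List Int
  | [] => []
  | x :: r => let c' := if x < mid then c + 1 else 0; c' :: cnts mid c' r

theorem possibleGo_eq_not_mem_cnts (k mid : Int) (l : List Int) (c : Int) :
    possibleGo k mid l c = true ↔ k ∉ cnts mid c l := by
  induction l generalizing c with
  | nil => simp [possibleGo, cnts]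
  | cons x r ih =>
    simp only [possibleGo, cnts]
    by_cases h : (if x < mid then c + 1 else 0) = k
    · simp [h]
    · simp only [beq_iff_eq, h, if_false, ih, List.mem_cons]
      constructor
      · intro hn hc; rcases hc with hc | hc
        · exact h hc.symm
        · exact hn hc
      · intro hn hc; exact hn (Or.inr hc)

theorem cnts_reach (k mid : Int) (l : List Int) (c : Int) (hc0 : 0 ≤ c) (hck : c < k)
    (h : ∃ y ∈ cnts mid c l, k ≤ y) : k ∈ cnts mid c l := by
  induction l generalizing c with
  | nil => rcases h with ⟨y, hy, _⟩; cases hy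
  | cons x r ih =>
    simp only [cnts] at *
    set c' := if x < mid then c + 1 else (0 : Int) with hc'
    by_cases hek : c' = k
    · exact hek ▸ List.mem_cons_self
    · have hb0 : 0 ≤ c' := by rw [hc']; split <;> omega
      have hbk : c' < k := by
        rcases lt_or_ge c' k with h1 | h1
        · exact h1
        · exfalso; rw [hc'] at h1 hek; revert h1 hek; split <;> omega
      rcases h with ⟨y, hy, hky⟩
      rcases List.mem_cons.1 hy with hy | hy
      · omega
      · exact List.mem_cons_of_mem _ (ih c' hb0 hbk ⟨y, hy, hky⟩)

theorem cnts_run_big (mid : Int) (l : List Int) (c : Int) (hc0 : 0 ≤ c) (m : Nat)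
    (hm : 1 ≤ m) (hlen : m ≤ l.length) (hall : ∀ x ∈ l.take m, x < mid) :
    ∃ y ∈ cnts mid c l, c + m ≤ y := by
  induction l generalizing c m with
  | nil => simp at hlen; omega
  | cons x r ih =>
    obtain ⟨m', rfl⟩ : ∃ m', m = m' + 1 := ⟨m - 1, by omega⟩
    have hx : x < mid := hall x (by simp [List.take_succ_cons])
    simp only [cnts, if_pos hx]
    rcases Nat.eq_zero_or_pos m' with rfl | hm'
    · exact ⟨c + 1, List.mem_cons_self, by push_cast; omega⟩
    · have hall' : ∀ y ∈ r.take m', y < mid := by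
        intro y hy; exact hall y (by simp [List.take_succ_cons, hy])
      obtain ⟨y, hy, hle⟩ := ih (c + 1) (by omega) m' hm' (by simpa using hlen) hall'
      exact ⟨y, List.mem_cons_of_mem _ hy, by push_cast at hle ⊢; omega⟩

-- a run of length m located at offset j still forces a counter value ≥ m
theorem cnts_window_big (mid : Int) (l : List Int) (c : Int) (hc0 : 0 ≤ c) (j m : Nat)
    (hm : 1 ≤ m) (hlen : j + m ≤ l.length) (hall : ∀ x ∈ (l.drop j).take m, x < mid) :
    ∃ y ∈ cnts mid c l, (m : Int) ≤ y := by
  induction l generalizing c j with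
  | nil => simp at hlen; omega
  | cons x r ih =>
    rcases Nat.eq_zero_or_pos j with rfl | hj
    · obtain ⟨y, hy, hle⟩ := cnts_run_big mid (x :: r) c hc0 m hm (by simpa using hlen) (by simpa using hall)
      exact ⟨y, hy, by omega⟩
    · obtain ⟨j', rfl⟩ : ∃ j', j = j' + 1 := ⟨j - 1, by omega⟩
      simp only [cnts]
      set c' := if x < mid then c + 1 else (0 : Int) with hc'
      have hb0 : 0 ≤ c' := by rw [hc']; split <;> omega
      obtain ⟨y, hy, hle⟩ := ih c' hb0 j' (by simp at hlen; omega) (by simpa using hall)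
      exact ⟨y, List.mem_cons_of_mem _ hy, hle⟩

theorem cnts_window (mid : Int) : ∀ (l u : List Int), (∀ x ∈ u, x < mid) → ∀ v : Int,
    v ∈ cnts mid (u.length : Int) l → 0 < v →
    ∃ i : Nat, i + v.toNat ≤ (u ++ l).length ∧ ∀ x ∈ ((u ++ l).drop i).take v.toNat, x < mid := by
  intro l
  induction l with
  | nil => intro u _ v hv _; cases hv
  | cons x r ih =>
    intro u hu v hv hpos
    by_cases hx : x < mid
    · rw [show cnts mid (u.length : Int) (x :: r)
            = ((u.length : Int) + 1) :: cnts mid ((u.length : Int) + 1) r from by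
          simp [cnts, hx]] at hv
      rcases List.mem_cons.1 hv with rfl | hv'
      · refine ⟨0, by simp only [List.length_append, List.length_cons]; omega, ?_⟩
        have htn : ((u.length : Int) + 1).toNat = u.length + 1 := by omega
        have htake : ((u ++ x :: r).drop 0).take (u.length + 1) = u ++ [x] := by
          rw [List.drop_zero, List.take_append]
          simp
        rw [htn, htake]
        intro y hy
        rcases List.mem_append.1 hy with h | h
        · exact hu y h
        · simpa using (List.mem_singleton.1 h) ▸ hx
      · have hlen : ((u.length : Int) + 1) = (((u ++ [x]).length : Nat) : Int) := by
          simp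
        rw [hlen] at hv'
        have hu' : ∀ y ∈ u ++ [x], y < mid := by
          intro y hy
          rcases List.mem_append.1 hy with h | h
          · exact hu y h
          · simpa using (List.mem_singleton.1 h) ▸ hx
        obtain ⟨i, hi, hw⟩ := ih (u ++ [x]) hu' v hv' hpos
        rw [List.append_assoc] at hi hw
        exact ⟨i, by simpa using hi, by simpa using hw⟩
    · rw [show cnts mid (u.length : Int) (x :: r) = (0 : Int) :: cnts mid 0 r from by
          simp [cnts, hx]] at hv
      rcases List.mem_cons.1 hv with rfl | hv'
      · exact absurd hpos (by norm_num)
      · obtain ⟨i, hi, hw⟩ := ih [] (by simp) v (by simpa using hv') hpos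
        refine ⟨i + (u.length + 1), ?_, ?_⟩
        · simp at hi ⊢; omega
        · have hdrop : (u ++ x :: r).drop (i + (u.length + 1)) = r.drop i := by
            rw [show u ++ x :: r = (u ++ [x]) ++ r from by simp,
                show i + (u.length + 1) = (u ++ [x]).length + i from by simp; omega]
            exact List.drop_length_add_append i
          rw [hdrop]
          intro y hy; exact hw y (by simpa using hy)

-- characterization of possible for 1 ≤ k: true iff every k-window holds a stone ≥ mid
theorem possible_char (stones : List Int) (k mid : Int) (hk : 1 ≤ k) :
    possible stones k mid = true ↔
      ∀ j : Nat, j + k.toNat ≤ stones.length →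
        ∃ x ∈ (stones.drop j).take k.toNat, mid ≤ x := by
  rw [possible, possibleGo_eq_not_mem_cnts]
  constructor
  · intro hnm j hj
    by_contra hno
    push_neg at hno
    have hall : ∀ x ∈ (stones.drop j).take k.toNat, x < mid := fun x hx => hno x hx
    obtain ⟨y, hy, hky⟩ :=
      cnts_window_big mid stones 0 le_rfl j k.toNat (by omega) hj hall
    exact hnm (cnts_reach k mid stones 0 le_rfl (by omega) ⟨y, hy, by omega⟩)
  · intro hwin hmem
    obtain ⟨i, hi, hw⟩ := cnts_window mid stones [] (by simp) k (by simpa using hmem) (by omega)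
    obtain ⟨x, hx, hmx⟩ := hwin i (by simpa using hi)
    exact absurd hmx (not_le.2 (hw x (by simpa using hx)))

-- possible is always true for k < 0 or k > len(stones)
theorem possibleGo_big (k mid : Int) : ∀ (l : List Int) (c : Int), 0 ≤ c →
    (k < 0 ∨ c + l.length < k) → possibleGo k mid l c = true := by
  intro l
  induction l with
  | nil => intros; simp [possibleGo]
  | cons x r ih =>
    intro c hc hcase
    simp only [possibleGo]
    set c' := if x < mid then c + 1 else (0 : Int) with hc'
    have hb : 0 ≤ c' ∧ c' ≤ c + 1 := by rw [hc']; split <;> omega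
    have hne : c' ≠ k := by
      rcases hcase with h | h
      · omega
      · simp at h; omega
    rw [if_neg (by simpa using hne)]
    refine ih c' hb.1 ?_
    rcases hcase with h | h
    · exact Or.inl h
    · right; simp at h ⊢; omega

theorem possible_out_of_range (stones : List Int) (k mid : Int)
    (h : k < 0 ∨ (stones.length : Int) < k) : possible stones k mid = true :=
  possibleGo_big k mid stones 0 le_rfl (by
    rcases h with h | h
    · exact Or.inl h
    · exact Or.inr (by omega))

-- binary search, all-true predicate
theorem bsLoop_all_true (stones : List Int) (k : Int)
    (hall : ∀ mid, possible stones k mid = true) :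
    ∀ l r : Int, l ≤ r - 1 → bsLoop stones k l r = r - 1 := by
  have main : ∀ N : Nat, ∀ l r : Int, (r - l).toNat ≤ N → l ≤ r - 1 →
      bsLoop stones k l r = r - 1 := by
    intro N
    induction N with
    | zero => intro l r hN hlr; exfalso; omega
    | succ N ih =>
      intro l r hN hlr
      rw [bsLoop]
      split
      · next h =>
        have h1 : l + 1 ≤ PySem.Int.floordiv (l + r) 2 :=
          (PySem.Int.le_floordiv_iff_mul_le (by omega)).2 (by omega)
        have h2 : PySem.Int.floordiv (l + r) 2 < r :=
          (PySem.Int.floordiv_lt_iff_lt_mul (by omega)).2 (by omega)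
        simp only [hall, if_true]
        exact ih _ _ (by omega) (by omega)
      · next h => omega
  exact fun l r hlr => main (r - l).toNat l r le_rfl hlr

-- binary search against a threshold T: possible mid ↔ mid ≤ T
theorem bsLoop_thresh (stones : List Int) (k T : Int)
    (hT : ∀ mid, possible stones k mid = true ↔ mid ≤ T) :
    ∀ l r : Int, l ≤ r - 1 → bsLoop stones k l r = max l (min (r - 1) T) := by
  have main : ∀ N : Nat, ∀ l r : Int, (r - l).toNat ≤ N → l ≤ r - 1 →
      bsLoop stones k l r = max l (min (r - 1) T) := by
    intro N
    induction N with
    | zero => intro l r hN hlr; exfalso; omega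
    | succ N ih =>
      intro l r hN hlr
      rw [bsLoop]
      split
      · next h =>
        have h1 : l + 1 ≤ PySem.Int.floordiv (l + r) 2 :=
          (PySem.Int.le_floordiv_iff_mul_le (by omega)).2 (by omega)
        have h2 : PySem.Int.floordiv (l + r) 2 < r :=
          (PySem.Int.floordiv_lt_iff_lt_mul (by omega)).2 (by omega)
        by_cases hp : possible stones k (PySem.Int.floordiv (l + r) 2) = true
        · have hmT : PySem.Int.floordiv (l + r) 2 ≤ T := (hT _).1 hp
          rw [if_pos hp, ih (PySem.Int.floordiv (l + r) 2) r (by omega) (by omega)]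
          omega
        · have hmT : T < PySem.Int.floordiv (l + r) 2 := by
            by_contra hc
            exact hp ((hT _).2 (by omega))
          rw [if_neg hp, ih l (PySem.Int.floordiv (l + r) 2) (by omega) (by omega)]
          omega
      · next h => omega
  exact fun l r hlr => main (r - l).toNat l r le_rfl hlr


-- ===== B-side: block decomposition =====

-- max of a nonempty list (0 on [] is never used)
def Wmax : List Int → Int
  | [] => 0
  | x :: r => r.foldl max x

-- max of the segment l[a..b] (inclusive)
def segmax (l : List Int) (a b : Nat) : Int := Wmax ((l.drop a).take (b + 1 - a))

theorem foldl_max_init (v : List Int) (a b : Int) :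
    v.foldl max (max a b) = max a (v.foldl max b) := by
  induction v generalizing b with
  | nil => rfl
  | cons z t ih => simp only [List.foldl_cons, max_assoc, ih]

theorem Wmax_cons (x : Int) (t : List Int) (ht : t ≠ []) :
    Wmax (x :: t) = max x (Wmax t) := by
  obtain ⟨y, t', rfl⟩ := List.exists_cons_of_ne_nil ht
  simp only [Wmax, List.foldl_cons]
  exact foldl_max_init t' x y

theorem Wmax_append (u v : List Int) (hu : u ≠ []) (hv : v ≠ []) :
    Wmax (u ++ v) = max (Wmax u) (Wmax v) := by
  obtain ⟨x, u', rfl⟩ := List.exists_cons_of_ne_nil hu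
  obtain ⟨y, v', rfl⟩ := List.exists_cons_of_ne_nil hv
  simp only [Wmax, List.cons_append, List.foldl_append, List.foldl_cons]
  rw [show max (List.foldl max x u') y = max (List.foldl max x u') y from rfl,
      ← foldl_max_init v' (List.foldl max x u') y]

theorem le_Wmax_iff (l : List Int) (hl : l ≠ []) (a : Int) :
    a ≤ Wmax l ↔ ∃ x ∈ l, a ≤ x := by
  obtain ⟨x, t, rfl⟩ := List.exists_cons_of_ne_nil hl
  simp only [Wmax, le_foldl_max_iff, List.mem_cons]
  constructor
  · rintro (h | ⟨y, hy, h⟩)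
    · exact ⟨x, Or.inl rfl, h⟩
    · exact ⟨y, Or.inr hy, h⟩
  · rintro ⟨y, hy | hy, h⟩
    · exact Or.inl (hy ▸ h)
    · exact Or.inr ⟨y, hy, h⟩

theorem Wmax_mem (l : List Int) (hl : l ≠ []) : Wmax l ∈ l := by
  obtain ⟨x, t, rfl⟩ := List.exists_cons_of_ne_nil hl
  show t.foldl max x ∈ x :: t
  rcases foldl_max_mem t x with h | h
  · rw [h]; exact List.mem_cons_self
  · exact List.mem_cons_of_mem _ h

theorem mod_toNat (i : Nat) (k : Int) (hk : 1 ≤ k) :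
    PySem.Int.mod (i : Int) k = ((i % k.toNat : Nat) : Int) := by
  conv_lhs => rw [show k = ((k.toNat : Nat) : Int) from (Int.toNat_of_nonneg (by omega)).symm]
  exact PySem.Int.mod_natCast i k.toNat

theorem preGo_length (k : Int) : ∀ (l : List Int) (i : Nat) (p : Int),
    (preGo k l i p).length = l.length := by
  intro l
  induction l with
  | nil => intros; rfl
  | cons x r ih => intro i p; simp [preGo, ih]

theorem sufGo_length (k : Int) (n : Nat) : ∀ (l : List Int) (i : Nat),
    (sufGo k n l i).length = l.length := by
  intro l
  induction l with
  | nil => intros; rfl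
  | cons x r ih => intro i; simp [sufGo, ih]

-- (i + t) % K = t with t < K forces i % K = 0
theorem mod_window_zero (K i t : Nat) (hK : 0 < K) (ht : t < K) (h : (i + t) % K = t) :
    i % K = 0 := by
  have hs : i % K < K := Nat.mod_lt _ hK
  have hm : (i + t) % K = (i % K + t) % K := by
    conv_lhs => rw [Nat.add_mod, Nat.mod_eq_of_lt ht]
  rw [hm] at h
  rcases Nat.lt_or_ge (i % K + t) K with h1 | h1
  · rw [Nat.mod_eq_of_lt h1] at h; omega
  · rw [Nat.mod_eq_sub_mod h1, Nat.mod_eq_of_lt (by omega)] at h; omega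

theorem mod_add_of_zero (K i t : Nat) (h : i % K = 0) : (i + t) % K = t % K := by
  obtain ⟨q, rfl⟩ := Nat.dvd_of_mod_eq_zero h
  exact Nat.mul_add_mod K q t

-- pre[j] = max of the current block's prefix ending at j (prev folded in when the block
-- started before this sublist)
theorem preGo_getD (k : Int) (hk : 1 ≤ k) : ∀ (l : List Int) (i : Nat) (prev : Int) (j : Nat),
    j < l.length →
    (preGo k l i prev).getD j 0 =
      if (i + j) % k.toNat ≤ j then segmax l (j - (i + j) % k.toNat) j
      else max prev (segmax l 0 j) := by
  intro l
  induction l with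
  | nil => intro i prev j hj; simp at hj
  | cons x r ih =>
    intro i prev j hj
    have hK : 0 < k.toNat := by omega
    have hb0 : ∀ i' : Nat, ((PySem.Int.mod (i' : Int) k == 0) = true) ↔ i' % k.toNat = 0 := by
      intro i'; rw [mod_toNat i' k hk, beq_iff_eq, Int.natCast_eq_zero]
    match j with
    | 0 =>
      simp only [preGo, List.getD_cons_zero, Nat.add_zero, Nat.le_zero]
      by_cases h0 : i % k.toNat = 0
      · rw [if_pos ((hb0 i).2 h0), if_pos h0]
        simp [segmax, Wmax]
      · rw [if_neg (fun hc => h0 ((hb0 i).1 hc)), if_neg h0]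
        simp [segmax, Wmax]
    | j' + 1 =>
      have hj' : j' < r.length := by simpa using hj
      simp only [preGo, List.getD_cons_succ]
      rw [ih (i + 1) _ j' hj']
      have hidx : i + (j' + 1) = (i + 1) + j' := by omega
      rw [hidx]
      set m := ((i + 1) + j') % k.toNat with hm
      have hmK : m < k.toNat := Nat.mod_lt _ hK
      have htk : r.take (j' + 1) ≠ [] := by
        have hlt : (r.take (j' + 1)).length = j' + 1 := by rw [List.length_take]; omega
        intro hnil; rw [hnil] at hlt; simp at hlt
      have hseg : segmax (x :: r) 0 (j' + 1) = max x (segmax r 0 j') := by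
        simp only [segmax, List.drop_zero, Nat.sub_zero]
        rw [List.take_succ_cons, Wmax_cons x _ htk]
      split_ifs with h1 h2 h3 h4 h5
      · -- block inside r on both sides
        rw [show j' + 1 - m = (j' - m) + 1 from by omega]
        simp only [segmax, List.drop_succ_cons]
        rw [show j' + 1 + 1 - (j' - m + 1) = j' + 1 - (j' - m) from by omega]
      · omega
      · -- i % K = 0 and j' < m ≤ j' + 1 : block starts exactly at x
        rw [show j' + 1 - m = 0 from by omega, hseg]
      · -- i % K = 0 but m > j' + 1 : impossible
        exfalso
        have hz : i % k.toNat = 0 := (hb0 i).1 h3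
        have h2' := mod_add_of_zero k.toNat i (j' + 1) hz
        rw [hidx, ← hm] at h2'
        have := Nat.mod_le (j' + 1) k.toNat
        omega
      · -- i % K ≠ 0 but m = j' + 1 : impossible
        exfalso
        apply h3
        apply (hb0 i).2
        exact mod_window_zero k.toNat i (j' + 1) hK (by omega) (by rw [hidx, ← hm]; omega)
      · -- prev still live on both sides
        rw [hseg, ← max_assoc]

theorem sufGo_getD (k : Int) (hk : 1 ≤ k) : ∀ (l : List Int) (i n : Nat), i + l.length = n →
    ∀ j : Nat, j < l.length →
    (sufGo k n l i).getD j 0 =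
      segmax l j (min (j + (k.toNat - 1 - (i + j) % k.toNat)) (l.length - 1)) := by
  intro l
  induction l with
  | nil => intro i n hn j hj; simp at hj
  | cons x r ih =>
    intro i n hn j hj
    have hK : 0 < k.toNat := by omega
    have hbm : ∀ i' : Nat, ((PySem.Int.mod (i' : Int) k == k - 1) = true) ↔ i' % k.toNat = k.toNat - 1 := by
      intro i'
      rw [mod_toNat i' k hk, beq_iff_eq,
          show k - 1 = ((k.toNat - 1 : Nat) : Int) from by omega]
      exact Int.natCast_inj
    have hbn : ∀ i' : Nat, ((i' == n - 1) = true) ↔ i' = n - 1 := fun i' => beq_iff_eq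
    match j with
    | 0 =>
      simp only [sufGo, List.getD_cons_zero, Nat.add_zero, Nat.zero_add, List.length_cons,
        Nat.add_sub_cancel]
      by_cases hEnd : i % k.toNat = k.toNat - 1 ∨ i = n - 1
      · rw [if_pos (by
          rcases hEnd with h | h
          · exact Bool.or_eq_true_iff.2 (Or.inl ((hbm i).2 h))
          · exact Bool.or_eq_true_iff.2 (Or.inr ((hbn i).2 h)))]
        have he : min (k.toNat - 1 - i % k.toNat) r.length = 0 := by
          rcases hEnd with h | h
          · rw [h]; simp
          · have hr0 : r.length = 0 := by
              simp only [List.length_cons] at hn; omega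
            rw [hr0]; simp
        rw [he]
        simp [segmax, Wmax]
      · push_neg at hEnd
        rw [if_neg (by
          intro hc
          rcases Bool.or_eq_true_iff.1 hc with h | h
          · exact hEnd.1 ((hbm i).1 h)
          · exact hEnd.2 ((hbn i).1 h))]
        have hrK : i % k.toNat < k.toNat := Nat.mod_lt _ hK
        have hiK : i % k.toNat < k.toNat - 1 := by
          rcases Nat.lt_or_ge (i % k.toNat) (k.toNat - 1) with h | h
          · exact h
          · exact absurd (by omega) hEnd.1
        have hK2 : 2 ≤ k.toNat := by omega
        have hr0 : 0 < r.length := by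
          rcases Nat.eq_zero_or_pos r.length with h | h
          · exfalso; apply hEnd.2; simp [h] at hn; omega
          · exact h
        have hs1 : (i + 1) % k.toNat = i % k.toNat + 1 := by
          rw [Nat.add_mod, Nat.mod_eq_of_lt (show 1 < k.toNat from hK2),
              Nat.mod_eq_of_lt (by omega)]
        have hsn : ∀ t : List Int, t.headD 0 = t.getD 0 0 := fun t => by cases t <;> rfl
        rw [hsn, ih (i + 1) n (by simp only [List.length_cons] at hn; omega) 0 hr0, hs1]
        have he : min (k.toNat - 1 - i % k.toNat) r.length
            = min (k.toNat - 1 - (i % k.toNat + 1)) (r.length - 1) + 1 := by omega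
        rw [Nat.zero_add, he]
        set e' := min (k.toNat - 1 - (i % k.toNat + 1)) (r.length - 1) with he'
        have htk : r.take (e' + 1) ≠ [] := by
          have hlt : (r.take (e' + 1)).length = min (e' + 1) r.length := List.length_take ..
          intro hnil; rw [hnil] at hlt; simp at hlt; omega
        simp only [segmax, List.drop_zero, Nat.sub_zero]
        rw [List.take_succ_cons, Wmax_cons x _ htk, max_comm]
    | j'' + 1 =>
      have hj'' : j'' < r.length := by simpa using hj
      simp only [sufGo, List.getD_cons_succ]
      rw [ih (i + 1) n (by simp only [List.length_cons] at hn; omega) j'' hj'',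
          show i + (j'' + 1) = (i + 1) + j'' from by omega]
      set c := k.toNat - 1 - ((i + 1) + j'') % k.toNat with hc
      have hmin : min (j'' + 1 + c) ((x :: r).length - 1)
          = min (j'' + c) (r.length - 1) + 1 := by
        simp only [List.length_cons, Nat.add_sub_cancel]
        omega
      rw [hmin]
      simp only [segmax, List.drop_succ_cons]
      rw [show min (j'' + c) (r.length - 1) + 1 + 1 - (j'' + 1)
            = min (j'' + c) (r.length - 1) + 1 - j'' from by omega]

theorem le_foldl_min_iff (l : List Int) (x a : Int) :
    a ≤ l.foldl min x ↔ a ≤ x ∧ ∀ y ∈ l, a ≤ y := by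
  induction l generalizing x with
  | nil => simp
  | cons z t ih =>
    simp only [List.foldl_cons, ih, le_min_iff, List.mem_cons]
    constructor
    · rintro ⟨⟨hx, hz⟩, ht⟩
      exact ⟨hx, fun y hy => hy.elim (fun e => e ▸ hz) (ht y)⟩
    · rintro ⟨hx, hall⟩
      exact ⟨⟨hx, hall z (Or.inl rfl)⟩, fun y hy => hall y (Or.inr hy)⟩

theorem foldl_min_le (l : List Int) (x : Int) : l.foldl min x ≤ x := by
  induction l generalizing x with
  | nil => simp
  | cons z t ih => exact le_trans (ih _) (min_le_left _ _)

theorem segmax_split (l : List Int) (a b c : Nat) (hab : a ≤ b) (hbc : b < c) (hc : c < l.length) :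
    segmax l a c = max (segmax l a b) (segmax l (b + 1) c) := by
  simp only [segmax]
  have hdd : (l.drop a).drop (b + 1 - a) = l.drop (b + 1) := by
    rw [List.drop_drop]
    congr 1
    omega
  have hsplit : (l.drop a).take (c + 1 - a)
      = (l.drop a).take (b + 1 - a) ++ ((l.drop (b + 1)).take (c + 1 - (b + 1))) := by
    rw [show c + 1 - a = (b + 1 - a) + (c + 1 - (b + 1)) from by omega, List.take_add, hdd]
  rw [hsplit]
  apply Wmax_append
  · have : ((l.drop a).take (b + 1 - a)).length = min (b + 1 - a) (l.length - a) := by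
      rw [List.length_take, List.length_drop]
    intro hnil; rw [hnil] at this; simp at this; omega
  · have : ((l.drop (b + 1)).take (c + 1 - (b + 1))).length
        = min (c + 1 - (b + 1)) (l.length - (b + 1)) := by
      rw [List.length_take, List.length_drop]
    intro hnil; rw [hnil] at this; simp at this; omega

-- the two block maxima cover the window exactly
theorem combine (l : List Int) (K j : Nat) (hK : 1 ≤ K) (hjK : j + K ≤ l.length) :
    max (segmax l j (min (j + (K - 1 - j % K)) (l.length - 1)))
        (segmax l ((K - 1 + j) - (K - 1 + j) % K) (K - 1 + j))
      = segmax l j (j + (K - 1)) := by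
  have hr : j % K < K := Nat.mod_lt _ (by omega)
  have hmin : min (j + (K - 1 - j % K)) (l.length - 1) = j + (K - 1 - j % K) := by omega
  rw [hmin]
  rcases Nat.eq_zero_or_pos (j % K) with hr0 | hr0
  · -- aligned window: both parts are the whole window
    have hmod : (K - 1 + j) % K = K - 1 := by
      rw [Nat.add_mod, hr0, Nat.add_zero, Nat.mod_mod_of_dvd _ dvd_rfl,
          Nat.mod_eq_of_lt (show K - 1 < K from by omega)]
    rw [hmod, show K - 1 + j - (K - 1) = j from by omega,
        show j + (K - 1 - j % K) = j + (K - 1) from by omega,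
        show K - 1 + j = j + (K - 1) from by omega, max_self]
  · -- window crosses one block boundary: the parts are adjacent and cover it
    have hmod : (K - 1 + j) % K = j % K - 1 := by
      rw [Nat.add_mod, Nat.mod_eq_of_lt (show K - 1 < K from by omega),
          show K - 1 + j % K = K + (j % K - 1) from by omega, Nat.add_mod_left,
          Nat.mod_eq_of_lt (by omega)]
    rw [hmod, show K - 1 + j - (j % K - 1) = (j + (K - 1 - j % K)) + 1 from by omega,
        show K - 1 + j = j + (K - 1) from by omega]
    exact (segmax_split l j (j + (K - 1 - j % K)) (j + (K - 1)) (by omega) (by omega)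
      (by omega)).symm

-- ===== VERDICT (by name: the statement is the Claim_ definition above) =====
theorem solution_spec : Claim_equal_solution := by
  intro stones k _ hpre
  obtain ⟨hne, hk0⟩ := hpre
  show solution stones k = solution_alt stones k
  rcases hmax : PySem.List.max? stones (fun y => y) with _ | m
  · exact absurd ((PySem.List.max?_eq_none_iff stones (fun y => y)).1 hmax) hne
  have hMle : ∀ y ∈ stones, y ≤ m := fun y hy => PySem.List.max?_isMax hmax y hy
  simp only [solution, solution_alt, hmax, Option.getD_some]
  by_cases hkr : 1 ≤ k ∧ k ≤ (stones.length : Int)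
  case neg =>
    have hout : k < 0 ∨ (stones.length : Int) < k := by
      rcases not_and_or.1 hkr with h | h <;> omega
    have hall : ∀ mid, possible stones k mid = true := fun mid =>
      possible_out_of_range stones k mid hout
    rw [if_neg hkr]
    by_cases h1 : 1 ≤ m
    · rw [bsLoop_all_true stones k hall 1 (m + 1) (by omega)]; omega
    · rw [bsLoop, dif_neg (show ¬ (1 < m + 1 - 1) from by omega)]; omega
  case pos =>
    obtain ⟨hk1, hkn⟩ := hkr
    rw [if_pos ⟨hk1, hkn⟩]
    set n := stones.length with hn
    set K := k.toNat with hKdef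
    have hK1 : 1 ≤ K := by omega
    have hKn : K ≤ n := by omega
    set f : Nat → Int := fun j => segmax stones j (j + (K - 1)) with hf
    set WL := ((sufGo k n stones 0).zip ((preGo k stones 0 0).drop (k - 1).toNat)).map
        (fun p => max p.1 p.2) with hWL
    have hpl : (preGo k stones 0 0).length = n := preGo_length k stones 0 0
    have hsl : (sufGo k n stones 0).length = n := sufGo_length k n stones 0
    have hkt : (k - 1).toNat = K - 1 := by omega
    have hWlen : WL.length = n - K + 1 := by
      rw [hWL, List.length_map, List.length_zip, hsl, List.length_drop, hpl, hkt]; omega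
    have hWget : WL = (List.range (n - K + 1)).map f := by
      apply List.ext_getElem
      · rw [hWlen, List.length_map, List.length_range]
      · intro j h1 h2
        have hjr : j < n - K + 1 := by rwa [hWlen] at h1
        have hjK : j + K ≤ n := by omega
        have hsufj : (sufGo k n stones 0).getD j 0
            = segmax stones j (min (j + (K - 1 - j % K)) (n - 1)) := by
          have h := sufGo_getD k hk1 stones 0 n (by omega) j (by omega)
          rw [Nat.zero_add] at h
          exact h
        have hprej : (preGo k stones 0 0).getD (K - 1 + j) 0
            = segmax stones ((K - 1 + j) - (K - 1 + j) % K) (K - 1 + j) := by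
          have h := preGo_getD k hk1 stones 0 0 (K - 1 + j) (by omega)
          rw [h, if_pos (by simpa using Nat.mod_le (K - 1 + j) K)]
          simp only [Nat.zero_add]
          rfl
        simp only [hWL, hkt, List.getElem_map, List.getElem_zip, List.getElem_drop,
          List.getElem_range]
        have hplt : K - 1 + j < (preGo k stones 0 0).length := by rw [hpl]; omega
        have hslt : j < (sufGo k n stones 0).length := by rw [hsl]; omega
        rw [← List.getD_eq_getElem (sufGo k n stones 0) 0 hslt,
            ← List.getD_eq_getElem (preGo k stones 0 0) 0 hplt,
            hsufj, hprej, combine stones K j hK1 hjK, hf]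
    have hne' : WL ≠ [] := by
      intro hc; rw [hc] at hWlen; simp at hWlen
    obtain ⟨w, ws, hcons⟩ := List.exists_cons_of_ne_nil hne'
    have hbest : PySem.List.min? WL (fun y => y) = some (ws.foldl min w) := by
      rw [hcons]; exact PySem.List.min?_id_cons w ws
    have hfw : ∀ j : Nat, f j = Wmax ((stones.drop j).take K) := by
      intro j
      simp only [hf, segmax]
      congr 2
      omega
    have hwne : ∀ j : Nat, j + K ≤ n → (stones.drop j).take K ≠ [] := by
      intro j hj hnil
      have : ((stones.drop j).take K).length = min K (n - j) := by
        rw [List.length_take, List.length_drop]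
      rw [hnil] at this; simp at this; omega
    have hmemWL : ∀ y, y ∈ WL ↔ ∃ j < n - K + 1, f j = y := by
      intro y
      rw [hWget]
      simp [List.mem_map, List.mem_range]
    have hthresh : ∀ mid, possible stones k mid = true ↔ mid ≤ ws.foldl min w := by
      intro mid
      rw [possible_char stones k mid hk1, le_foldl_min_iff]
      constructor
      · intro hwin
        have hall : ∀ y ∈ WL, mid ≤ y := by
          intro y hy
          obtain ⟨j, hjr, rfl⟩ := (hmemWL y).1 hy
          rw [hfw j]
          exact (le_Wmax_iff _ (hwne j (by omega)) mid).2 (hwin j (by omega))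
        exact ⟨hall w (by rw [hcons]; exact List.mem_cons_self),
          fun y hy => hall y (by rw [hcons]; exact List.mem_cons_of_mem _ hy)⟩
      · rintro ⟨hw, hws⟩ j hjn
        have hy : f j ∈ WL := (hmemWL (f j)).2 ⟨j, by omega, rfl⟩
        have hmidf : mid ≤ f j := by
          rw [hcons] at hy
          rcases List.mem_cons.1 hy with h | h
          · exact h ▸ hw
          · exact hws _ h
        rw [hfw j] at hmidf
        exact (le_Wmax_iff _ (hwne j (by omega)) mid).1 hmidf
    have hwm : w ≤ m := by
      have hw0 : f 0 ∈ WL := (hmemWL (f 0)).2 ⟨0, by omega, rfl⟩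
      have hwmem : ∀ y ∈ WL, y ≤ m := by
        intro y hy
        obtain ⟨j, hjr, rfl⟩ := (hmemWL y).1 hy
        rw [hfw j]
        have hmem := Wmax_mem _ (hwne j (by omega))
        exact hMle _ (List.mem_of_mem_drop (List.mem_of_mem_take hmem))
      exact hwmem w (by rw [hcons]; exact List.mem_cons_self)
    have hTm : ws.foldl min w ≤ m := le_trans (foldl_min_le ws w) hwm
    rw [hbest]
    simp only [Option.getD_some]
    by_cases h1 : 1 ≤ m
    · rw [bsLoop_thresh stones k (ws.foldl min w) hthresh 1 (m + 1) (by omega)]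
      omega
    · rw [bsLoop, dif_neg (show ¬ (1 < m + 1 - 1) from by omega)]
      omega
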